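-- pv_equiv track=rewrite | github.com/Beraty14/astrobyte | solarguard-tr/api/data_processor.py | get_highest_flare_class
-- ===== SOURCE A (Python) =====
-- from typing import List, Dict, Any, Optional
--
-- def get_highest_flare_class(flares: List[Dict[str, Any]]) -> tuple:
--     """
--     Get highest flare class from flare list
--
--     Returns:
--         Tuple of (max_class, highest_flare)
--     """
--     max_class = 'A'
--     highest_flare = '-'
--
--     for flare in flares:
--         class_type = flare.get("classType", "")
--         if not class_type:
--             continue
--
--         if class_type.startswith('X'):
--             max_class = 'X'
--         elif max_class != 'X' and class_type.startswith('M'):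
--             max_class = 'M'
--         elif max_class not in ['X', 'M'] and class_type.startswith('C'):
--             max_class = 'C'
--         elif max_class not in ['X', 'M', 'C'] and class_type.startswith('B'):
--             max_class = 'B'
--
--         if class_type > highest_flare:
--             highest_flare = class_type
--
--     return max_class, highest_flare
-- ===== SOURCE B (Python) =====
-- def get_highest_flare_class(flares):
--     present = set()
--     highest_flare = '-'
--     for flare in flares:
--         class_type = flare.get("classType", "")
--         if not class_type:
--             continue
--         for letter in ('X', 'M', 'C', 'B'):
--             if class_type.startswith(letter):
--                 present.add(letter)
--                 break
--         if class_type > highest_flare: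
--             highest_flare = class_type
--     max_class = 'A'
--     for letter in ('X', 'M', 'C', 'B'):
--         if letter in present:
--             max_class = letter
--             break
--     return max_class, highest_flare
-- ===== Notes on version B (the rewrite author's own statement) =====
-- stated objective: simpler
-- what changed: Replaces A's interleaved stateful elif-cascade over max_class with a two-phase decomposition: one pass collects the set of priority letters present (first match of X/M/C/B per flare), then the highest-priority letter present is selected after the loop.
import Mathlib
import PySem

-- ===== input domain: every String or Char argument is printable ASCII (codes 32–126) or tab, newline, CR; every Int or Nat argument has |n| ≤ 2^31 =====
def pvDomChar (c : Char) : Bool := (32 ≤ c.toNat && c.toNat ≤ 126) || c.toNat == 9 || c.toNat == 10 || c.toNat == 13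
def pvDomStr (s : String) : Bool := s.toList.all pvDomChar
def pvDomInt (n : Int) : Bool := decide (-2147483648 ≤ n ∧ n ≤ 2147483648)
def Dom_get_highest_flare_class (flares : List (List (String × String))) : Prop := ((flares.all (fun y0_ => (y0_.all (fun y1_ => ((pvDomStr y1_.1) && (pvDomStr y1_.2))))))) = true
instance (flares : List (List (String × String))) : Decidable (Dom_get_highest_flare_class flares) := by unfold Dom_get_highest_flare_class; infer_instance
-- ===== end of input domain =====

-- B replaces A's interleaved elif-cascade on max_class by a two-phase decomposition:
-- one loop collects the set of priority letters present, then the first of X,M,C,B present is selected. Simpler, same cost.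

-- ===== PORT A =====
-- loop body of A's for-loop; state = (max_class, highest_flare)
def pvStepA (st : String × String) (flare : List (String × String)) : String × String :=
  let class_type := PySem.Dict.getD (PySem.Dict.mk flare) "classType" ""
  if class_type = "" then st
  else
    let max_class :=
      if PySem.Str.startswith class_type "X" then "X"
      else if st.1 ≠ "X" ∧ PySem.Str.startswith class_type "M" then "M"
      else if st.1 ∉ ["X", "M"] ∧ PySem.Str.startswith class_type "C" then "C"
      else if st.1 ∉ ["X", "M", "C"] ∧ PySem.Str.startswith class_type "B" then "B"
      else st.1
    let highest_flare := if st.2 < class_type then class_type else st.2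
    (max_class, highest_flare)

def get_highest_flare_class (flares : List (List (String × String))) : String × String :=
  flares.foldl pvStepA ("A", "-")

-- ===== PORT B =====
-- loop body of B's for-loop; state = (present, highest_flare);
-- "for letter in ('X','M','C','B'): if …: add; break" = first letter satisfying the test (List.find?)
def pvStepB (st : PySem.Set String × String) (flare : List (String × String)) : PySem.Set String × String :=
  let class_type := PySem.Dict.getD (PySem.Dict.mk flare) "classType" ""
  if class_type = "" then st
  else
    let present :=
      match ["X", "M", "C", "B"].find? (fun letter => PySem.Str.startswith class_type letter) with
      | some letter => PySem.Set.add st.1 letter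
      | none => st.1
    let highest_flare := if st.2 < class_type then class_type else st.2
    (present, highest_flare)

-- the post-loop selection: max_class = 'A', overridden by the first of X,M,C,B found in `present`
def pvSel (present : PySem.Set String) : String :=
  match ["X", "M", "C", "B"].find? (fun letter => PySem.Set.contains present letter) with
  | some letter => letter
  | none => "A"

def get_highest_flare_class_alt (flares : List (List (String × String))) : String × String :=
  let st := flares.foldl pvStepB (PySem.Set.empty, "-")
  (pvSel st.1, st.2)

-- ===== PRECONDITION & SPEC =====
def Spec_get_highest_flare_class (flares : List (List (String × String))) (out : String × String) : Prop := out = get_highest_flare_class_alt flares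
instance (flares : List (List (String × String))) (out : String × String) : Decidable (Spec_get_highest_flare_class flares out) := by unfold Spec_get_highest_flare_class; infer_instance

-- ===== CLAIM (what is proved, stated in full; the proofs are below) =====
def Claim_equal_get_highest_flare_class : Prop := ∀ (flares : List (List (String × String))), Dom_get_highest_flare_class flares → Spec_get_highest_flare_class flares (get_highest_flare_class flares)

-- ===== LEMMAS AND PROOFS =====

-- pvSel as a nested if over the four membership tests
lemma pvSel_eq (s : PySem.Set String) :
    pvSel s = if "X" ∈ s then "X" else if "M" ∈ s then "M" else if "C" ∈ s then "C" else if "B" ∈ s then "B" else "A" := by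
  by_cases h1 : "X" ∈ s <;> by_cases h2 : "M" ∈ s <;> by_cases h3 : "C" ∈ s <;> by_cases h4 : "B" ∈ s <;>
    simp [pvSel, List.find?, PySem.Set.contains, h1, h2, h3, h4]

-- one step of A = abstraction (pvSel) of one step of B
lemma pvStep_comm (s : PySem.Set String) (h : String) (f : List (String × String)) :
    pvStepA (pvSel s, h) f = (pvSel (pvStepB (s, h) f).1, (pvStepB (s, h) f).2) := by
  simp only [pvStepA, pvStepB]
  by_cases hct : PySem.Dict.getD (PySem.Dict.mk f) "classType" "" = ""
  · simp [hct]
  · simp only [if_neg hct]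
    by_cases hX : PySem.Chars.startswith (PySem.Dict.getD (PySem.Dict.mk f) "classType" "").toList ['X'] = true <;>
    by_cases hM : PySem.Chars.startswith (PySem.Dict.getD (PySem.Dict.mk f) "classType" "").toList ['M'] = true <;>
    by_cases hC : PySem.Chars.startswith (PySem.Dict.getD (PySem.Dict.mk f) "classType" "").toList ['C'] = true <;>
    by_cases hB : PySem.Chars.startswith (PySem.Dict.getD (PySem.Dict.mk f) "classType" "").toList ['B'] = true <;>
    by_cases m1 : "X" ∈ s <;> by_cases m2 : "M" ∈ s <;> by_cases m3 : "C" ∈ s <;> by_cases m4 : "B" ∈ s <;>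
      simp [List.find?, hX, hM, hC, hB, pvSel_eq, m1, m2, m3, m4]

lemma pvFoldl_equiv (l : List (List (String × String))) (s : PySem.Set String) (h : String) :
    l.foldl pvStepA (pvSel s, h) = (pvSel (l.foldl pvStepB (s, h)).1, (l.foldl pvStepB (s, h)).2) := by
  induction l generalizing s h with
  | nil => rfl
  | cons f t ih =>
      simp only [List.foldl_cons, pvStep_comm]
      have := ih (pvStepB (s, h) f).1 (pvStepB (s, h) f).2
      simpa using this

-- ===== VERDICT (by name: the statement is the Claim_ definition above) =====
theorem get_highest_flare_class_spec : Claim_equal_get_highest_flare_class := by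
  intro flares _
  unfold Spec_get_highest_flare_class get_highest_flare_class get_highest_flare_class_alt
  have := pvFoldl_equiv flares PySem.Set.empty "-"
  simpa [pvSel, PySem.Set.empty, PySem.Set.contains] using this
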